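-- pv_equiv track=rewrite | github.com/mulle-cc/roam-code | src/roam/commands/cmd_affected.py | _group_by_module
-- ===== SOURCE A (Python) =====
-- from collections import defaultdict, deque
--
-- def _group_by_module(changed_files, affected_files):
--     """Group files into modules (top-level directory or root).
--
--     Returns ``{module: {"changed": count, "affected": count}}``.
--     """
--     modules = defaultdict(lambda: {"changed": 0, "affected": 0})
--
--     def _module_name(path):
--         parts = path.replace("\\", "/").split("/")
--         if len(parts) > 1:
--             return parts[0] + "/"
--         return "(root)"
--
--     for f in changed_files:
--         modules[_module_name(f)]["changed"] += 1
--
--     for f in affected_files: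
--         if f not in changed_files:
--             modules[_module_name(f)]["affected"] += 1
--
--     return dict(sorted(modules.items()))
-- ===== SOURCE B (Python) =====
-- def _group_by_module(changed_files, affected_files):
--     """Group files into modules (top-level directory or root).
--
--     Returns ``{module: {"changed": count, "affected": count}}``.
--     """
--     def _module_name(path):
--         parts = path.replace("\\", "/").split("/")
--         return parts[0] + "/" if len(parts) > 1 else "(root)"
--
--     def _runs(keys):
--         # keys is sorted; run-length encode it into (key, length) pairs
--         runs = []
--         i, n = 0, len(keys)
--         while i < n:
--             j = i + 1
--             while j < n and keys[j] == keys[i]: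
--                 j += 1
--             runs.append((keys[i], j - i))
--             i = j
--         return runs
--
--     changed_runs = _runs(sorted(_module_name(f) for f in changed_files))
--     affected_runs = _runs(sorted(_module_name(f) for f in affected_files
--                                  if f not in changed_files))
--
--     # two-pointer merge of the two sorted run lists; keys come out in sorted order
--     out = {}
--     i = j = 0
--     while i < len(changed_runs) and j < len(affected_runs):
--         (kc, c), (ka, a) = changed_runs[i], affected_runs[j]
--         if kc < ka:
--             out[kc] = {"changed": c, "affected": 0}
--             i += 1
--         elif kc == ka:
--             out[kc] = {"changed": c, "affected": a}
--             i += 1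
--             j += 1
--         else:
--             out[ka] = {"changed": 0, "affected": a}
--             j += 1
--     for kc, c in changed_runs[i:]:
--         out[kc] = {"changed": c, "affected": 0}
--     for ka, a in affected_runs[j:]:
--         out[ka] = {"changed": 0, "affected": a}
--     return out
-- ===== Notes on version B (the rewrite author's own statement) =====
-- stated objective: alternative
-- what changed: Replaces the defaultdict-of-dicts hash accumulation (then sorted) by a sort-then-scan pipeline: sort the module keys of each category, run-length encode each sorted list, and two-pointer-merge the two sorted run lists, emitting the output dict directly in sorted key order with the missing category defaulted to 0.
import Mathlib
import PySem

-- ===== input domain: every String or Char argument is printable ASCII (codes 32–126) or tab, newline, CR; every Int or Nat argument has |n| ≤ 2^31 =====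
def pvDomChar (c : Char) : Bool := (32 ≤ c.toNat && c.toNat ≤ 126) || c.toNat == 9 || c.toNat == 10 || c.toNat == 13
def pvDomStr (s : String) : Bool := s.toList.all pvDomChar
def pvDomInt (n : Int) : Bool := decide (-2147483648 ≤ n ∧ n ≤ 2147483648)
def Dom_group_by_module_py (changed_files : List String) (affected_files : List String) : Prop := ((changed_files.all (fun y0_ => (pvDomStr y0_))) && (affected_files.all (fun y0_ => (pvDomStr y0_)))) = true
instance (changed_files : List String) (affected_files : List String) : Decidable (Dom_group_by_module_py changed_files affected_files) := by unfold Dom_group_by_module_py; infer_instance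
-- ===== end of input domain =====

-- B replaces A's defaultdict-of-dicts accumulation (then sorted) by a sort / run-length-encode /
-- two-pointer-merge pipeline emitting the result directly in sorted key order (objective: alternative).


-- ===== PORT A =====
-- _module_name: both Pythons define this identical nested helper, so it is shared by both ports.
def pvModuleName (path : String) : String :=
  let parts := PySem.Chars.splitOn (PySem.Str.replace path "\\" "/").toList ['/']
  if parts.length > 1 then String.ofList parts[0]! ++ "/" else "(root)"

-- the defaultdict's default_factory value {"changed": 0, "affected": 0}
def pvDefRec : PySem.Dict String Int := PySem.Dict.ofList [("changed", 0), ("affected", 0)]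

def group_by_module_py (changed_files : List String) (affected_files : List String) : List (String × List (String × Int)) :=
  -- modules[_module_name(f)]["changed"] += 1 : defaultdict access-then-mutate is Dict.modify with the
  -- factory default; the inner dict always contains the category key, so its `+= 1` is an inner modify
  -- (its default 0 is never taken).
  let modules : PySem.Dict String (PySem.Dict String Int) :=
    changed_files.foldl
      (fun d f => d.modify (pvModuleName f) pvDefRec (fun inner => inner.modify "changed" 0 (· + 1)))
      PySem.Dict.empty
  let modules :=
    affected_files.foldl
      (fun d f =>
        if changed_files.contains f then d
        else d.modify (pvModuleName f) pvDefRec (fun inner => inner.modify "affected" 0 (· + 1)))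
      modules
  -- dict(sorted(modules.items())): keys are distinct, so Python's tuple comparison is decided by the key
  (PySem.List.sorted modules.items (fun p => p.1) false).map (fun p => (p.1, p.2.items))

-- ===== PORT B =====
-- _runs: the index-based while loop scans the maximal run at position i (the inner `while` is a
-- takeWhile over the rest) and continues after it (dropWhile); transliterated as this recursion.
def pvRuns : List String → List (String × Int)
  | [] => []
  | k :: t =>
      (k, 1 + (t.takeWhile (· == k)).length) :: pvRuns (t.dropWhile (· == k))
  termination_by l => l.length
  decreasing_by
    have := List.length_dropWhile_le (· == k) t
    simp; omega

-- the two-pointer merge loop plus the two tail-draining `for` loops (the [] cases)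
def pvMerge : List (String × Int) → List (String × Int) → List (String × List (String × Int))
  | [], [] => []
  | [], (ka, a) :: ar => (ka, [("changed", 0), ("affected", a)]) :: pvMerge [] ar
  | (kc, c) :: cr, [] => (kc, [("changed", c), ("affected", 0)]) :: pvMerge cr []
  | (kc, c) :: cr, (ka, a) :: ar =>
      if kc < ka then (kc, [("changed", c), ("affected", 0)]) :: pvMerge cr ((ka, a) :: ar)
      else if kc = ka then (kc, [("changed", c), ("affected", a)]) :: pvMerge cr ar
      else (ka, [("changed", 0), ("affected", a)]) :: pvMerge ((kc, c) :: cr) ar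
  termination_by cr ar => cr.length + ar.length

def group_by_module_py_alt (changed_files : List String) (affected_files : List String) : List (String × List (String × Int)) :=
  let changed_runs :=
    pvRuns (PySem.List.sorted (changed_files.map pvModuleName) (fun x => x) false)
  let affected_runs :=
    pvRuns (PySem.List.sorted
      ((affected_files.filter (fun f => !(changed_files.contains f))).map pvModuleName)
      (fun x => x) false)
  pvMerge changed_runs affected_runs

-- ===== PRECONDITION & SPEC =====
def Spec_group_by_module_py (changed_files : List String) (affected_files : List String) (out : List (String × List (String × Int))) : Prop := out = group_by_module_py_alt changed_files affected_files
instance (changed_files : List String) (affected_files : List String) (out : List (String × List (String × Int))) : Decidable (Spec_group_by_module_py changed_files affected_files out) := by unfold Spec_group_by_module_py; infer_instance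

-- ===== CLAIM (what is proved, stated in full; the proofs are below) =====
def Claim_equal_group_by_module_py : Prop := ∀ (changed_files : List String) (affected_files : List String), Dom_group_by_module_py changed_files affected_files → Spec_group_by_module_py changed_files affected_files (group_by_module_py changed_files affected_files)

-- ===== LEMMAS AND PROOFS =====

-- the inner record {"changed": a, "affected": b}
def mkRec (a b : Int) : PySem.Dict String Int := PySem.Dict.ofList [("changed", a), ("affected", b)]

theorem mkRec_items (a b : Int) : (mkRec a b).items = [("changed", a), ("affected", b)] := rfl

theorem mkRec_modC (a b : Int) : (mkRec a b).modify "changed" 0 (· + 1) = mkRec (a + 1) b := rfl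

theorem mkRec_modA (a b : Int) : (mkRec a b).modify "affected" 0 (· + 1) = mkRec a (b + 1) := rfl

-- the guarded affected-loop is the unguarded loop over the filtered list
theorem loop2_eq_filter (cs : List String) (L : List String)
    (d : PySem.Dict String (PySem.Dict String Int)) :
    L.foldl
      (fun d f =>
        if cs.contains f then d
        else d.modify (pvModuleName f) pvDefRec (fun inner => inner.modify "affected" 0 (· + 1))) d
    = (L.filter (fun f => !(cs.contains f))).foldl
        (fun d f => d.modify (pvModuleName f) pvDefRec (fun inner => inner.modify "affected" 0 (· + 1))) d := by
  induction L generalizing d with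
  | nil => rfl
  | cons f t ih =>
      rw [List.foldl_cons, List.filter_cons]
      by_cases h : cs.contains f = true
      · rw [if_pos h, show (!cs.contains f) = false from by rw [h]; rfl,
            if_neg Bool.false_ne_true]
        exact ih _
      · have hb : cs.contains f = false := by simpa using h
        rw [if_neg h, show (!cs.contains f) = true from by rw [hb]; rfl,
            if_pos rfl, List.foldl_cons]
        exact ih _

-- lookup after the "changed" loop: the changed count grows by the occurrence count of m
set_option maxHeartbeats 1600000 in
theorem loopC_getD (L : List String) (d : PySem.Dict String (PySem.Dict String Int))
    (m : String) (a b : Int) (hm : d.getD m pvDefRec = mkRec a b) :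
    (L.foldl
      (fun d f => d.modify (pvModuleName f) pvDefRec (fun inner => inner.modify "changed" 0 (· + 1))) d).getD
      m pvDefRec = mkRec (a + ((L.map pvModuleName).count m : Int)) b := by
  induction L generalizing d a with
  | nil => simpa using hm
  | cons f t ih =>
      simp only [List.foldl_cons, List.map_cons, List.count_cons]
      by_cases h : pvModuleName f = m
      · rw [ih _ (a + 1) (by rw [PySem.Dict.getD_modify, if_pos h.symm, h, hm, mkRec_modC])]
        simp only [h, beq_self_eq_true, if_true]
        exact congrArg (mkRec · b) (by push_cast; ring)
      · rw [ih _ a (by rw [PySem.Dict.getD_modify, if_neg (fun hc => h hc.symm), hm])]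
        simp [h]

-- lookup after the "affected" loop
set_option maxHeartbeats 1600000 in
theorem loopA_getD (L : List String) (d : PySem.Dict String (PySem.Dict String Int))
    (m : String) (a b : Int) (hm : d.getD m pvDefRec = mkRec a b) :
    (L.foldl
      (fun d f => d.modify (pvModuleName f) pvDefRec (fun inner => inner.modify "affected" 0 (· + 1))) d).getD
      m pvDefRec = mkRec a (b + ((L.map pvModuleName).count m : Int)) := by
  induction L generalizing d b with
  | nil => simpa using hm
  | cons f t ih =>
      simp only [List.foldl_cons, List.map_cons, List.count_cons]
      by_cases h : pvModuleName f = m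
      · rw [ih _ (b + 1) (by rw [PySem.Dict.getD_modify, if_pos h.symm, h, hm, mkRec_modA])]
        simp only [h, beq_self_eq_true, if_true]
        exact congrArg (mkRec a ·) (by push_cast; ring)
      · rw [ih _ b (by rw [PySem.Dict.getD_modify, if_neg (fun hc => h hc.symm), hm])]
        simp [h]

-- pairwise ≤ plus nodup gives pairwise <
theorem pairwise_lt_of_sorted_nodup (K : List String) (h : K.Nodup) :
    (PySem.List.sorted K (fun m => m) false).Pairwise (· < ·) := by
  have h1 : (PySem.List.sorted K (fun m => m) false).Pairwise (· ≤ ·) :=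
    PySem.List.sorted_pairwise K (fun m => m)
  have h2 : (PySem.List.sorted K (fun m => m) false).Nodup :=
    (PySem.List.sorted_perm K (fun m => m) false).nodup_iff.mpr h
  exact (h1.and h2).imp (fun ⟨hle, hne⟩ => lt_of_le_of_ne hle hne)

-- sorting a key-tagged list by fst is mapping over the sorted keys
theorem sorted_map_fst {β : Type} (K : List String) (h : K.Nodup) (g : String → β) :
    PySem.List.sorted (K.map (fun k => (k, g k))) (fun p => p.1) false
      = (PySem.List.sorted K (fun m => m) false).map (fun k => (k, g k)) := by
  apply PySem.List.sorted_eq_of_perm_of_pairwise_lt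
  · exact ((PySem.List.sorted_perm K (fun m => m) false).map _)
  · exact List.pairwise_map.mpr (pairwise_lt_of_sorted_nodup K h)

-- ===== B-side lemmas =====

-- keys of the run-length encoding are exactly the elements
theorem runs_mem (L : List String) (x : String) :
    x ∈ (pvRuns L).map Prod.fst ↔ x ∈ L := by
  fun_induction pvRuns L with
  | case1 => simp
  | case2 k t ih =>
      simp only [List.map_cons, List.mem_cons, ih]
      constructor
      · rintro (rfl | h)
        · exact Or.inl rfl
        · exact Or.inr ((List.dropWhile_sublist _).subset h)
      · rintro (rfl | h)
        · exact Or.inl rfl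
        · by_cases hx : x = k
          · exact Or.inl hx
          · refine Or.inr ?_
            rw [← List.takeWhile_append_dropWhile (p := (· == k)) (l := t)] at h
            rcases List.mem_append.mp h with h1 | h2
            · exact absurd (by simpa using List.mem_takeWhile_imp h1) hx
            · exact h2

-- everything after the leading run of a sorted list is strictly larger than the head
theorem dw_gt (k : String) (t : List String) : (k :: t).Pairwise (· ≤ ·) →
    ∀ x ∈ t.dropWhile (· == k), k < x := by
  induction t with
  | nil => intro _ x hx; simp at hx
  | cons a t' ih =>
      intro h x hx
      rw [List.dropWhile_cons] at hx
      by_cases ha : (a == k) = true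
      · rw [if_pos ha] at hx
        have hak : a = k := by simpa using ha
        subst hak
        exact ih (List.pairwise_cons.mpr
          ⟨fun y hy => (List.pairwise_cons.mp (List.pairwise_cons.mp h).2).1 y hy,
           (List.pairwise_cons.mp (List.pairwise_cons.mp h).2).2⟩) x hx
      · rw [if_neg ha] at hx
        have hane : a ≠ k := by simpa using ha
        have hka : k < a :=
          lt_of_le_of_ne ((List.pairwise_cons.mp h).1 a (List.mem_cons_self ..)) (Ne.symm hane)
        rcases List.mem_cons.mp hx with rfl | hx'
        · exact hka
        · exact lt_of_lt_of_le hka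
            ((List.pairwise_cons.mp (List.pairwise_cons.mp h).2).1 x hx')

-- in a sorted list the occurrences of the head are exactly its leading run
theorem count_head_run (k : String) (t : List String) (h : (k :: t).Pairwise (· ≤ ·)) :
    t.count k = (t.takeWhile (· == k)).length := by
  conv_lhs => rw [← List.takeWhile_append_dropWhile (p := (· == k)) (l := t)]
  rw [List.count_append]
  have h1 : (t.takeWhile (· == k)).count k = (t.takeWhile (· == k)).length :=
    List.count_eq_length.mpr (fun b hb => by
      have hbk := List.mem_takeWhile_imp (p := fun y => y == k) hb
      exact (eq_of_beq hbk).symm)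
  have h2 : (t.dropWhile (· == k)).count k = 0 :=
    List.count_eq_zero.mpr (fun hmem => lt_irrefl k (dw_gt k t h k hmem))
  omega

-- association lookup with default 0 (what the merged output carries per category)
def pvLook : List (String × Int) → String → Int
  | [], _ => 0
  | p :: t, x => if p.1 = x then p.2 else pvLook t x

theorem pvLook_not_mem (L : List (String × Int)) (x : String) (h : x ∉ L.map Prod.fst) :
    pvLook L x = 0 := by
  induction L with
  | nil => rfl
  | cons p t ih =>
      simp only [List.map_cons, List.mem_cons, not_or] at h
      have hne : ¬ p.1 = x := fun e => h.1 e.symm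
      simp only [pvLook, if_neg hne]
      exact ih h.2

-- looked up in the run-length encoding of a sorted list, a key yields its count
theorem pvLook_runs (S : List String) (x : String) : S.Pairwise (· ≤ ·) →
    pvLook (pvRuns S) x = (S.count x : Int) := by
  fun_induction pvRuns S with
  | case1 => intro _; simp [pvLook]
  | case2 k t ih =>
      intro h
      have hpt : t.Pairwise (· ≤ ·) := (List.pairwise_cons.mp h).2
      have hdwp : (t.dropWhile (· == k)).Pairwise (· ≤ ·) :=
        List.Pairwise.sublist (List.dropWhile_sublist _) hpt
      simp only [pvLook]
      by_cases hk : k = x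
      · subst hk
        rw [if_pos rfl, List.count_cons_self, count_head_run k t h]
        push_cast; ring
      · rw [if_neg hk, ih hdwp]
        have hxc : (t.dropWhile (· == k)).count x = (k :: t).count x := by
          rw [List.count_cons_of_ne hk]
          conv_rhs => rw [← List.takeWhile_append_dropWhile (p := (· == k)) (l := t)]
          rw [List.count_append]
          have htw : (t.takeWhile (· == k)).count x = 0 :=
            List.count_eq_zero.mpr (fun hmem => by
              have hxk := List.mem_takeWhile_imp (p := fun y => y == k) hmem
              exact hk (eq_of_beq hxk).symm)
          omega
        rw [hxc]

-- the run keys of a sorted list are strictly increasing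
theorem runs_keys_pairwise (S : List String) : S.Pairwise (· ≤ ·) →
    ((pvRuns S).map Prod.fst).Pairwise (· < ·) := by
  fun_induction pvRuns S with
  | case1 => intro _; simp
  | case2 k t ih =>
      intro h
      have hpt : t.Pairwise (· ≤ ·) := (List.pairwise_cons.mp h).2
      have hdwp : (t.dropWhile (· == k)).Pairwise (· ≤ ·) :=
        List.Pairwise.sublist (List.dropWhile_sublist _) hpt
      simp only [List.map_cons]
      refine List.pairwise_cons.mpr ⟨?_, ih hdwp⟩
      intro x hx
      exact dw_gt k t h x ((runs_mem _ x).mp hx)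

-- the key list the two-pointer merge walks (proof-only abstraction of pvMerge's key flow)
def mkeys : List String → List String → List String
  | [], l => l
  | l, [] => l
  | a :: as, b :: bs =>
      if a < b then a :: mkeys as (b :: bs)
      else if a = b then a :: mkeys as bs
      else b :: mkeys (a :: as) bs
  termination_by l1 l2 => l1.length + l2.length

theorem mkeys_nil_left (l : List String) : mkeys [] l = l := by rw [mkeys.eq_def]

theorem mkeys_cons_nil (a : String) (as : List String) : mkeys (a :: as) [] = a :: as := by
  rw [mkeys.eq_def]

theorem mkeys_nil_right (l : List String) : mkeys l [] = l := by
  cases l with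
  | nil => rw [mkeys.eq_def]
  | cons a as => exact mkeys_cons_nil a as

theorem mkeys_cons_cons (a b : String) (as bs : List String) :
    mkeys (a :: as) (b :: bs)
      = if a < b then a :: mkeys as (b :: bs)
        else if a = b then a :: mkeys as bs
        else b :: mkeys (a :: as) bs := by
  rw [mkeys.eq_def]

theorem mkeys_mem (K1 K2 : List String) (x : String) :
    x ∈ mkeys K1 K2 ↔ x ∈ K1 ∨ x ∈ K2 := by
  fun_induction mkeys K1 K2 with
  | case1 l => simp
  | case2 a as => simp
  | case3 a as b bs h ih => simp only [List.mem_cons, ih]; tauto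
  | case4 as a bs hlt ih => simp only [List.mem_cons, ih]; tauto
  | case5 a as b bs h1 h2 ih => simp only [List.mem_cons, ih]; tauto

theorem mkeys_pairwise (K1 K2 : List String) : K1.Pairwise (· < ·) → K2.Pairwise (· < ·) →
    (mkeys K1 K2).Pairwise (· < ·) := by
  fun_induction mkeys K1 K2 with
  | case1 l => intro _ h2; exact h2
  | case2 a as => intro h1 _; exact h1
  | case3 a as b bs h ih =>
      intro h1 h2
      obtain ⟨ha, has⟩ := List.pairwise_cons.mp h1
      refine List.pairwise_cons.mpr ⟨?_, ih has h2⟩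
      intro x hx
      rcases (mkeys_mem _ _ x).mp hx with hx1 | hx2
      · exact ha x hx1
      · rcases List.mem_cons.mp hx2 with rfl | hx3
        · exact h
        · exact lt_trans h ((List.pairwise_cons.mp h2).1 x hx3)
  | case4 as a bs hlt ih =>
      intro h1 h2
      obtain ⟨ha, has⟩ := List.pairwise_cons.mp h1
      obtain ⟨hb, hbs⟩ := List.pairwise_cons.mp h2
      refine List.pairwise_cons.mpr ⟨?_, ih has hbs⟩
      intro x hx
      rcases (mkeys_mem _ _ x).mp hx with hx1 | hx2
      · exact ha x hx1
      · exact hb x hx2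
  | case5 a as b bs hlt hne ih =>
      intro h1 h2
      obtain ⟨ha, has⟩ := List.pairwise_cons.mp h1
      obtain ⟨hb, hbs⟩ := List.pairwise_cons.mp h2
      have hba : b < a := lt_of_le_of_ne (not_lt.mp hlt) (fun e => hne e.symm)
      refine List.pairwise_cons.mpr ⟨?_, ih h1 hbs⟩
      intro x hx
      rcases (mkeys_mem _ _ x).mp hx with hx1 | hx2
      · rcases List.mem_cons.mp hx1 with rfl | hx3
        · exact hba
        · exact lt_trans hba (ha x hx3)
      · exact hb x hx2

theorem mkeys_bound (K1 K2 : List String) (c : String)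
    (h1 : ∀ x ∈ K1, c < x) (h2 : ∀ x ∈ K2, c < x) : ∀ x ∈ mkeys K1 K2, c < x :=
  fun x hx => ((mkeys_mem K1 K2 x).mp hx).elim (h1 x) (h2 x)

-- the output entry for one module key
def pvEntry (cr ar : List (String × Int)) (k : String) : String × List (String × Int) :=
  (k, [("changed", pvLook cr k), ("affected", pvLook ar k)])

-- the two-pointer merge is the per-key entry map over the merged key list
theorem merge_canon (cr ar : List (String × Int)) :
    (cr.map Prod.fst).Pairwise (· < ·) → (ar.map Prod.fst).Pairwise (· < ·) →
    pvMerge cr ar = (mkeys (cr.map Prod.fst) (ar.map Prod.fst)).map (pvEntry cr ar) := by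
  fun_induction pvMerge cr ar with
  | case1 => intro _ _; simp [mkeys_nil_left]
  | case2 ka a ar ih =>
      intro h1 h2
      simp only [List.map_cons, List.map_nil] at h2 ⊢
      obtain ⟨hb, hbs⟩ := List.pairwise_cons.mp h2
      rw [mkeys_nil_left, List.map_cons]
      refine congrArg₂ _ ?_ ?_
      · simp [pvEntry, pvLook]
      · rw [ih List.Pairwise.nil hbs]
        simp only [List.map_nil]
        rw [mkeys_nil_left]
        refine List.map_congr_left (fun x hx => ?_)
        have hne : ¬ ka = x := ne_of_lt (hb x hx)
        simp [pvEntry, pvLook, hne]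
  | case3 kc c cr ih =>
      intro h1 h2
      simp only [List.map_cons, List.map_nil] at h1 ⊢
      obtain ⟨hb, hbs⟩ := List.pairwise_cons.mp h1
      rw [mkeys_cons_nil, List.map_cons]
      refine congrArg₂ _ ?_ ?_
      · simp [pvEntry, pvLook]
      · rw [ih hbs List.Pairwise.nil]
        simp only [List.map_nil]
        rw [mkeys_nil_right]
        refine List.map_congr_left (fun x hx => ?_)
        have hne : ¬ kc = x := ne_of_lt (hb x hx)
        simp [pvEntry, pvLook, hne]
  | case4 kc c cr ka a ar hlt ih =>
      intro h1 h2
      simp only [List.map_cons] at h1 h2 ⊢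
      obtain ⟨hc, hcs⟩ := List.pairwise_cons.mp h1
      obtain ⟨hab, habs⟩ := List.pairwise_cons.mp h2
      rw [mkeys_cons_cons, if_pos hlt, List.map_cons]
      refine congrArg₂ _ ?_ ?_
      · have hnm : kc ∉ ((ka, a) :: ar).map Prod.fst := by
          simp only [List.map_cons, List.mem_cons, not_or]
          exact ⟨ne_of_lt hlt, fun hmem => absurd (lt_trans hlt (hab kc hmem)) (lt_irrefl kc)⟩
        have hl0 : pvLook ((ka, a) :: ar) kc = 0 := pvLook_not_mem _ _ hnm
        simp only [pvEntry, hl0]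
        simp [pvLook]
      · rw [ih hcs h2]
        simp only [List.map_cons]
        refine List.map_congr_left (fun x hx => ?_)
        have hgt : kc < x := by
          refine mkeys_bound _ _ kc hc ?_ x (by simpa using hx)
          intro y hy
          rcases List.mem_cons.mp hy with rfl | hy'
          · exact hlt
          · exact lt_trans hlt (hab y hy')
        have hne : ¬ kc = x := ne_of_lt hgt
        simp [pvEntry, pvLook, hne]
  | case5 c cr ka a ar hlt ih =>
      intro h1 h2
      simp only [List.map_cons] at h1 h2 ⊢
      obtain ⟨hc, hcs⟩ := List.pairwise_cons.mp h1
      obtain ⟨hab, habs⟩ := List.pairwise_cons.mp h2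
      rw [mkeys_cons_cons, if_neg hlt, if_pos rfl, List.map_cons]
      refine congrArg₂ _ ?_ ?_
      · simp [pvEntry, pvLook]
      · rw [ih hcs habs]
        refine List.map_congr_left (fun x hx => ?_)
        have hgt : ka < x := mkeys_bound _ _ ka hc hab x hx
        have hne : ¬ ka = x := ne_of_lt hgt
        simp [pvEntry, pvLook, hne]
  | case6 kc c cr ka a ar hlt hne ih =>
      intro h1 h2
      simp only [List.map_cons] at h1 h2 ⊢
      obtain ⟨hc, hcs⟩ := List.pairwise_cons.mp h1
      obtain ⟨hab, habs⟩ := List.pairwise_cons.mp h2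
      have hba : ka < kc := lt_of_le_of_ne (not_lt.mp hlt) (fun e => hne e.symm)
      rw [mkeys_cons_cons, if_neg hlt, if_neg hne, List.map_cons]
      refine congrArg₂ _ ?_ ?_
      · have hnm : ka ∉ ((kc, c) :: cr).map Prod.fst := by
          simp only [List.map_cons, List.mem_cons, not_or]
          exact ⟨ne_of_lt hba, fun hmem => absurd (lt_trans hba (hc ka hmem)) (lt_irrefl ka)⟩
        have hl0 : pvLook ((kc, c) :: cr) ka = 0 := pvLook_not_mem _ _ hnm
        simp only [pvEntry, hl0]
        simp [pvLook]
      · rw [ih h1 habs]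
        simp only [List.map_cons]
        refine List.map_congr_left (fun x hx => ?_)
        have hgt : ka < x := by
          refine mkeys_bound _ _ ka ?_ hab x (by simpa using hx)
          intro y hy
          rcases List.mem_cons.mp hy with rfl | hy'
          · exact hba
          · exact lt_trans hba (hc y hy')
        have hnex : ¬ ka = x := ne_of_lt hgt
        simp [pvEntry, pvLook, hnex]

-- ===== VERDICT (by name: the statement is the Claim_ definition above) =====
set_option maxHeartbeats 1600000 in
theorem group_by_module_py_spec : Claim_equal_group_by_module_py := by
  intro cs as _
  unfold Spec_group_by_module_py
  simp only [group_by_module_py, group_by_module_py_alt]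
  rw [loop2_eq_filter]
  -- A side: the accumulated dict, characterised
  have hgetD : ∀ m,
      ((((as.filter (fun f => !(cs.contains f))).foldl
          (fun d f => d.modify (pvModuleName f) pvDefRec (fun inner => inner.modify "affected" 0 (· + 1)))
          (cs.foldl
            (fun d f => d.modify (pvModuleName f) pvDefRec (fun inner => inner.modify "changed" 0 (· + 1)))
            PySem.Dict.empty)).getD m pvDefRec))
        = mkRec (((cs.map pvModuleName).count m : Int))
            ((((as.filter (fun f => !(cs.contains f))).map pvModuleName).count m : Int)) := by
    intro m
    have h1 := loopC_getD cs PySem.Dict.empty m 0 0 (by rfl)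
    rw [zero_add] at h1
    have h2 := loopA_getD (as.filter (fun f => !(cs.contains f))) _ m _ 0 h1
    rw [zero_add] at h2
    exact h2
  have hkeys :
      ((as.filter (fun f => !(cs.contains f))).foldl
          (fun d f => d.modify (pvModuleName f) pvDefRec (fun inner => inner.modify "affected" 0 (· + 1)))
          (cs.foldl
            (fun d f => d.modify (pvModuleName f) pvDefRec (fun inner => inner.modify "changed" 0 (· + 1)))
            PySem.Dict.empty)).keys
        = PySem.Set.update (PySem.Set.ofList (cs.map pvModuleName))
            ((as.filter (fun f => !(cs.contains f))).map pvModuleName) := by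
    rw [PySem.Dict.keys_foldl_modify_key, PySem.Dict.keys_foldl_modify_key]
    simp [PySem.Set.update_nil_left]
  have hnod :
      (PySem.Set.update (PySem.Set.ofList (cs.map pvModuleName))
        ((as.filter (fun f => !(cs.contains f))).map pvModuleName)).Nodup :=
    PySem.Set.nodup_update _ _ (PySem.Set.nodup_ofList _)
  have hitems :
      ((as.filter (fun f => !(cs.contains f))).foldl
          (fun d f => d.modify (pvModuleName f) pvDefRec (fun inner => inner.modify "affected" 0 (· + 1)))
          (cs.foldl
            (fun d f => d.modify (pvModuleName f) pvDefRec (fun inner => inner.modify "changed" 0 (· + 1)))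
            PySem.Dict.empty)).items
        = (PySem.Set.update (PySem.Set.ofList (cs.map pvModuleName))
            ((as.filter (fun f => !(cs.contains f))).map pvModuleName)).map
            (fun k => (k, mkRec (((cs.map pvModuleName).count k : Int))
              ((((as.filter (fun f => !(cs.contains f))).map pvModuleName).count k : Int)))) := by
    rw [PySem.Dict.items_eq_map_keys _ (by rw [hkeys]; exact hnod) pvDefRec, hkeys]
    exact List.map_congr_left (fun k _ => by rw [hgetD])
  rw [hitems, sorted_map_fst _ hnod, List.map_map]
  -- B side: sortedness facts for the two sorted key streams
  have h1p : (PySem.List.sorted (cs.map pvModuleName) (fun x => x) false).Pairwise (· ≤ ·) := by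
    simpa using PySem.List.sorted_pairwise (cs.map pvModuleName) (fun x => x)
  have h2p : (PySem.List.sorted
      ((as.filter (fun f => !(cs.contains f))).map pvModuleName) (fun x => x) false).Pairwise (· ≤ ·) := by
    simpa using PySem.List.sorted_pairwise
      ((as.filter (fun f => !(cs.contains f))).map pvModuleName) (fun x => x)
  have hK1 := runs_keys_pairwise _ h1p
  have hK2 := runs_keys_pairwise _ h2p
  rw [merge_canon _ _ hK1 hK2]
  -- the two key lists coincide
  have hnodmk :
      (mkeys ((pvRuns (PySem.List.sorted (cs.map pvModuleName) (fun x => x) false)).map Prod.fst)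
        ((pvRuns (PySem.List.sorted ((as.filter (fun f => !(cs.contains f))).map pvModuleName)
          (fun x => x) false)).map Prod.fst)).Nodup :=
    (mkeys_pairwise _ _ hK1 hK2).imp ne_of_lt
  have hkeyeq :
      PySem.List.sorted
        (PySem.Set.update (PySem.Set.ofList (cs.map pvModuleName))
          ((as.filter (fun f => !(cs.contains f))).map pvModuleName)) (fun m => m) false
      = mkeys ((pvRuns (PySem.List.sorted (cs.map pvModuleName) (fun x => x) false)).map Prod.fst)
          ((pvRuns (PySem.List.sorted ((as.filter (fun f => !(cs.contains f))).map pvModuleName)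
            (fun x => x) false)).map Prod.fst) := by
    apply PySem.List.sorted_eq_of_perm_of_pairwise_lt (key := fun m : String => m)
    · rw [List.perm_ext_iff_of_nodup hnodmk hnod]
      intro x
      rw [mkeys_mem, runs_mem, runs_mem, PySem.List.mem_sorted, PySem.List.mem_sorted]
      simp [PySem.Set.mem_update, PySem.Set.mem_ofList]
    · exact mkeys_pairwise _ _ hK1 hK2
  rw [hkeyeq]
  refine List.map_congr_left (fun x hx => ?_)
  -- per-key entries coincide: looked-up run lengths are the counts
  have hl1 := pvLook_runs (PySem.List.sorted (cs.map pvModuleName) (fun x => x) false) x h1p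
  have hl2 := pvLook_runs
    (PySem.List.sorted ((as.filter (fun f => !(cs.contains f))).map pvModuleName) (fun x => x) false)
    x h2p
  rw [(PySem.List.sorted_perm (cs.map pvModuleName) (fun x => x) false).count_eq x] at hl1
  rw [(PySem.List.sorted_perm ((as.filter (fun f => !(cs.contains f))).map pvModuleName)
      (fun x => x) false).count_eq x] at hl2
  simp only [List.contains_eq_mem] at hl2
  simp [pvEntry, hl1, hl2, Function.comp, mkRec_items]
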